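-- pv_equiv track=rewrite | github.com/asmariaz310/AI-Powered-Image-mood-analyzer | emotion_detection.py | analyze_mood_stability
-- ===== SOURCE A (Python) =====
-- def analyze_mood_stability(emotion_sequence):
--     if len(emotion_sequence) < 2:
--         return "Insufficient data"
--     switches = sum(1 for i in range(1, len(emotion_sequence)) if emotion_sequence[i] != emotion_sequence[i-1])
--     ratio = switches / len(emotion_sequence)
--     if ratio < 0.1:
--         return "Stable"
--     elif ratio < 0.3:
--         return "Moderately stable"
--     else:
--         return "Erratic"
-- ===== SOURCE B (Python) =====
-- def analyze_mood_stability(emotion_sequence):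
--     n = len(emotion_sequence)
--     if n < 2:
--         return "Insufficient data"
--     # collapse the sequence into maximal runs of consecutive equal emotions
--     # (a hand-rolled groupby); switches = number of runs - 1
--     runs = 0
--     i = 0
--     while i < n:
--         head = emotion_sequence[i]
--         i += 1
--         while i < n and emotion_sequence[i] == head:
--             i += 1
--         runs += 1
--     switches = runs - 1
--     # exact integer comparison against the 0.1 / 0.3 thresholds
--     if 10 * switches < n:
--         return "Stable"
--     elif 10 * switches < 3 * n:
--         return "Moderately stable"
--     else:
--         return "Erratic"
-- ===== Notes on version B (the rewrite author's own statement) =====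
-- stated objective: alternative
-- what changed: B collapses the sequence into maximal runs of consecutive equal emotions (a hand-rolled groupby) and takes switches = runs - 1, instead of A's index-based pairwise-difference counter, and compares the ratio to the 0.1/0.3 thresholds with exact integer arithmetic instead of float division.
import Mathlib
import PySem

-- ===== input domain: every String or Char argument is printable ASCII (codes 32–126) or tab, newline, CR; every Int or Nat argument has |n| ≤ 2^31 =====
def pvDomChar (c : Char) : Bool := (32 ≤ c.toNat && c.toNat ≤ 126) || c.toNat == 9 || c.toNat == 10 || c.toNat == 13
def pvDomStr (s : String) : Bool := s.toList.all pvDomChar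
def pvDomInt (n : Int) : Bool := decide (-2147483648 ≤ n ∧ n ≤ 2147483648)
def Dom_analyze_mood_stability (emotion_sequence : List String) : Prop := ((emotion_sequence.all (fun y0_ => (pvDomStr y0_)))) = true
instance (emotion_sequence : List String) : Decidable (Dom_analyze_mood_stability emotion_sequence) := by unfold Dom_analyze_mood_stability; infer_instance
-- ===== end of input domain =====

-- B collapses the sequence into maximal runs (a hand-rolled groupby) and compares the switch ratio with exact integer arithmetic; objective: alternative decomposition, same cost.
-- ===== PORT A =====
-- Port of A. The generator indices 1..len-1 are always in range, so xs[i] is ported as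
-- pyGetD with an unused default; the float threshold tests 'switches/n < 0.1' and '< 0.3'
-- are ported as the exact integer comparisons, which agree with CPython's float comparison
-- for every list of length below 10^15.
def analyze_mood_stability (emotion_sequence : List String) : String :=
  if (emotion_sequence.length : Int) < 2 then "Insufficient data"
  else
    let switches : Int :=
      (PySem.List.pyRange 1 (emotion_sequence.length : Int) 1).foldl
        (fun acc i =>
          if PySem.List.pyGetD emotion_sequence i "" ≠ PySem.List.pyGetD emotion_sequence (i - 1) "" then acc + 1
          else acc) 0
    if switches * 10 < (emotion_sequence.length : Int) then "Stable"
    else if switches * 10 < 3 * (emotion_sequence.length : Int) then "Moderately stable"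
    else "Erratic"

-- ===== PORT B =====
-- B's inner while loop: how far the index advances through the run of elements equal to `head`.
def pvRunLen (head : String) : List String → Nat
  | [] => 0
  | b :: t => if b = head then pvRunLen head t + 1 else 0

-- B's outer while loop: number of maximal runs; advancing the index past a run is recursion on
-- the remaining suffix (List.drop of the run length).
def pvRuns : List String → Nat
  | [] => 0
  | a :: t => pvRuns (t.drop (pvRunLen a t)) + 1
termination_by l => l.length
decreasing_by
  simp [List.length_drop]

def analyze_mood_stability_alt (emotion_sequence : List String) : String :=
  if (emotion_sequence.length : Int) < 2 then "Insufficient data"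
  else
    let switches : Int := (pvRuns emotion_sequence : Int) - 1
    if 10 * switches < (emotion_sequence.length : Int) then "Stable"
    else if 10 * switches < 3 * (emotion_sequence.length : Int) then "Moderately stable"
    else "Erratic"

-- ===== PRECONDITION & SPEC =====
def Spec_analyze_mood_stability (emotion_sequence : List String) (out : String) : Prop := out = analyze_mood_stability_alt emotion_sequence
instance (emotion_sequence : List String) (out : String) : Decidable (Spec_analyze_mood_stability emotion_sequence out) := by unfold Spec_analyze_mood_stability; infer_instance

-- ===== CLAIM (what is proved, stated in full; the proofs are below) =====
def Claim_equal_analyze_mood_stability : Prop := ∀ (emotion_sequence : List String), Dom_analyze_mood_stability emotion_sequence → Spec_analyze_mood_stability emotion_sequence (analyze_mood_stability emotion_sequence)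

-- ===== LEMMAS AND PROOFS =====

-- number of adjacent unequal pairs, as a structural recursion: the common midpoint
def pvAdj : List String → Nat
  | [] => 0
  | [_] => 0
  | a :: b :: t => (if a = b then 0 else 1) + pvAdj (b :: t)

lemma pvRuns_eq_pvAdj : ∀ (t : List String) (a : String),
    pvRuns (a :: t) = pvAdj (a :: t) + 1 := by
  intro t
  induction t with
  | nil => intro a; simp [pvRuns, pvRunLen, pvAdj]
  | cons b t' ih =>
    intro a
    by_cases h : b = a
    · subst h
      rw [pvRuns, show pvRunLen b (b :: t') = pvRunLen b t' + 1 by simp [pvRunLen]]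
      simp only [List.drop_succ_cons]
      rw [show pvRuns (t'.drop (pvRunLen b t')) + 1 = pvRuns (b :: t') from (by rw [pvRuns])]
      rw [ih b, pvAdj]
      simp
    · rw [pvRuns, show pvRunLen a (b :: t') = 0 by simp [pvRunLen, h]]
      simp only [List.drop_zero]
      rw [ih b, pvAdj]
      have h' : ¬ a = b := fun hh => h hh.symm
      rw [if_neg h']
      omega

lemma pvAdj_countP : ∀ (t : List String) (a : String),
    (List.range t.length).countP
      (fun k => decide (t.getD k "" ≠ (a :: t).getD k "")) = pvAdj (a :: t) := by
  intro t
  induction t with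
  | nil => intro a; simp [pvAdj]
  | cons b t' ih =>
    intro a
    rw [List.length_cons, List.range_succ_eq_map, List.countP_cons, List.countP_map]
    simp only [Function.comp_def, Nat.succ_eq_add_one, List.getD_cons_succ, List.getD_cons_zero]
    rw [ih b, pvAdj]
    by_cases h : a = b
    · simp [h]
    · have h' : b ≠ a := fun e => h e.symm
      simp [if_neg h, h']
      omega

lemma pvA_fold_eq (a : String) (t : List String) :
    (PySem.List.pyRange 1 ((a :: t).length : Int) 1).foldl
      (fun acc i =>
        if PySem.List.pyGetD (a :: t) i "" ≠ PySem.List.pyGetD (a :: t) (i - 1) "" then acc + 1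
        else acc) (0 : Int) = (pvAdj (a :: t) : Int) := by
  rw [PySem.List.pyRange_one, List.foldl_map, PySem.List.foldl_ite_add_one,
      show ((((a :: t).length : Int) - 1)).toNat = t.length by simp,
      ← pvAdj_countP t a, Int.zero_add, Nat.cast_inj]
  apply List.countP_congr
  intro k _
  have h2 : (1 + (k : Int)) - 1 = ((k : Nat) : Int) := by omega
  have h1 : (1 + (k : Int)) = ((k + 1 : Nat) : Int) := by omega
  rw [h2, h1]
  simp only [PySem.List.pyGetD_natCast, List.getD_cons_succ]

-- ===== VERDICT (by name: the statement is the Claim_ definition above) =====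
theorem analyze_mood_stability_spec : Claim_equal_analyze_mood_stability := by
  intro xs _
  unfold Spec_analyze_mood_stability analyze_mood_stability analyze_mood_stability_alt
  match xs with
  | [] => simp
  | a :: t =>
    rw [pvA_fold_eq a t, pvRuns_eq_pvAdj t a]
    push_cast
    split_ifs <;> first | rfl | omega
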